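-- pv_equiv track=rewrite | github.com/junhyukkk/junhyuk | 월말평가/7월 월말평가 파이썬/problem11.py | get_row_col_maxsum
-- ===== SOURCE A (Python) =====
-- def get_row_col_maxsum(matrix):
--     max_sum = 0
--     max_sum_type = ""
--
--     # 각 행(row)의 합 계산
--     for row in matrix:
--         row_sum = 0
--         for element in row:
--             row_sum += element
--         if row_sum > max_sum:
--             max_sum = row_sum
--             max_sum_type = "row"
--
--     # 각 열(column)의 합 계산
--     num_rows = 0
--     num_cols = 0
--     for row in matrix:
--         num_rows += 1
--         for element in row:
--             if num_rows == 1: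
--                 num_cols += 1
--
--     for j in range(num_cols):
--         col_sum = 0
--         for i in range(num_rows):
--             col_sum += matrix[i][j]
--         if col_sum > max_sum:
--             max_sum = col_sum
--             max_sum_type = "col"
--
--     return (max_sum_type, max_sum)
-- ===== SOURCE B (Python) =====
-- def get_row_col_maxsum(matrix):
--     num_cols = len(matrix[0]) if matrix else 0
--     col_sums = [0] * num_cols
--     max_sum = 0
--     max_sum_type = ""
--     for row in matrix:
--         row_sum = sum(row)
--         if row_sum > max_sum:
--             max_sum = row_sum
--             max_sum_type = "row"
--         for j in range(num_cols):
--             col_sums[j] += row[j]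
--     for col_sum in col_sums:
--         if col_sum > max_sum:
--             max_sum = col_sum
--             max_sum_type = "col"
--     return (max_sum_type, max_sum)
-- ===== Notes on version B (the rewrite author's own statement) =====
-- stated objective: faster
-- what changed: Single pass over the rows that both finds the best row sum and accumulates a column-sums table, followed by one scan of that table, instead of A's three separate passes and its column loop that re-indexes the whole matrix per column.
import Mathlib
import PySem

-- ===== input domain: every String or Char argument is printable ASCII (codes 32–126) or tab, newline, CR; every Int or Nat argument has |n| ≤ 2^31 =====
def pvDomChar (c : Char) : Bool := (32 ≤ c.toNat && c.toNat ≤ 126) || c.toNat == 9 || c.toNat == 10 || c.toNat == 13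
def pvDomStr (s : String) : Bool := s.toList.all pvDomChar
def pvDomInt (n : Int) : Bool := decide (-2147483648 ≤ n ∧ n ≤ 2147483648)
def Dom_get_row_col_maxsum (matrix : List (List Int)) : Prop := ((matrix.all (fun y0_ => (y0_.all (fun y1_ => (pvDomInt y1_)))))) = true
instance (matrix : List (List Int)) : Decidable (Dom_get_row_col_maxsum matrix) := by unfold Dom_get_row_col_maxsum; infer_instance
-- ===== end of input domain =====

-- B merges A's row pass, counting pass and per-column re-indexing into one sequential pass
-- building a column-sums table, then one scan of that table (objective: faster, constant-factor).

-- ===== PORT A =====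
-- literal port of A: row-sum pass, counting pass, then a column loop indexing matrix[i][j]
-- (matrix[i][j] → PySem.List.pyGetD, exact under Pre_ which excludes the IndexError inputs)
def get_row_col_maxsum (matrix : List (List Int)) : String × Int :=
  let st1 := matrix.foldl (fun (st : Int × String) row =>
    let row_sum := row.foldl (fun s e => s + e) 0
    if row_sum > st.1 then (row_sum, "row") else st) (0, "")
  let cnt := matrix.foldl (fun (c : Int × Int) row =>
    let nr := c.1 + 1
    let nc := row.foldl (fun k (_ : Int) => if nr = 1 then k + 1 else k) c.2
    (nr, nc)) (0, 0)
  let st2 := (PySem.List.pyRange 0 cnt.2 1).foldl (fun (st : Int × String) j =>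
    let col_sum := (PySem.List.pyRange 0 cnt.1 1).foldl
      (fun s i => s + PySem.List.pyGetD (PySem.List.pyGetD matrix i []) j 0) 0
    if col_sum > st.1 then (col_sum, "col") else st) st1
  (st2.2, st2.1)

-- ===== PORT B =====
-- port of Source B: one fold over the rows carrying (best, col_sums), then a scan of col_sums
def get_row_col_maxsum_alt (matrix : List (List Int)) : String × Int :=
  let num_cols := (matrix.headD []).length
  let st := matrix.foldl (fun (st : (Int × String) × List Int) row =>
    let row_sum := row.foldl (fun s e => s + e) 0
    let best := if row_sum > st.1.1 then (row_sum, "row") else st.1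
    let cs := (List.range num_cols).map (fun j => st.2.getD j 0 + row.getD j 0)
    (best, cs)) ((0, ""), List.replicate num_cols 0)
  let fin := st.2.foldl (fun (p : Int × String) c =>
    if c > p.1 then (c, "col") else p) st.1
  (fin.2, fin.1)

-- ===== PRECONDITION & SPEC =====
-- Pre_ excludes exactly the ragged inputs where some row is shorter than the first row:
-- there Python A (and B) raises IndexError in the column pass.
def Pre_get_row_col_maxsum (matrix : List (List Int)) : Prop :=
  ∀ row ∈ matrix, (matrix.headD []).length ≤ row.length
instance (matrix : List (List Int)) : Decidable (Pre_get_row_col_maxsum matrix) := by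
  unfold Pre_get_row_col_maxsum; infer_instance
def pvWitness_get_row_col_maxsum : List (List Int) := [[1, 2], [3, 4]]

def Spec_get_row_col_maxsum (matrix : List (List Int)) (out : String × Int) : Prop := out = get_row_col_maxsum_alt matrix
instance (matrix : List (List Int)) (out : String × Int) : Decidable (Spec_get_row_col_maxsum matrix out) := by unfold Spec_get_row_col_maxsum; infer_instance

-- ===== CLAIM (what is proved, stated in full; the proofs are below) =====
def Claim_equal_get_row_col_maxsum : Prop := ∀ (matrix : List (List Int)), Dom_get_row_col_maxsum matrix → Pre_get_row_col_maxsum matrix → Spec_get_row_col_maxsum matrix (get_row_col_maxsum matrix)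

-- ===== LEMMAS AND PROOFS =====

-- the counting pass of A returns (length, length of the first row)
theorem pv_count_aux (m : List (List Int)) (a b : Int) (ha : 1 ≤ a) :
    m.foldl (fun (c : Int × Int) row =>
      (c.1 + 1, row.foldl (fun k (_ : Int) => if c.1 + 1 = 1 then k + 1 else k) c.2)) (a, b)
    = (a + m.length, b) := by
  induction m generalizing a b with
  | nil => simp
  | cons r t ih =>
    have h1 : ¬ (a + 1 = 1) := by omega
    have hrow : ∀ (b' : Int), r.foldl (fun k (_ : Int) => if a + 1 = 1 then k + 1 else k) b' = b' := by
      intro b'; induction r generalizing b' with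
      | nil => simp
      | cons x xs ihx =>
        simp only [List.foldl]
        rw [if_neg h1, ihx]
    simp only [List.foldl, hrow]
    rw [ih (a + 1) b (by omega)]
    simp; ring

theorem pv_count (m : List (List Int)) :
    m.foldl (fun (c : Int × Int) row =>
      (c.1 + 1, row.foldl (fun k (_ : Int) => if c.1 + 1 = 1 then k + 1 else k) c.2)) (0, 0)
    = ((m.length : Int), ((m.headD []).length : Int)) := by
  cases m with
  | nil => simp
  | cons r t =>
    have hrow : ∀ (b' : Int), r.foldl (fun k (_ : Int) => if (0 : Int) + 1 = 1 then k + 1 else k) b' = b' + r.length := by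
      intro b'; induction r generalizing b' with
      | nil => simp
      | cons x xs ihx =>
        simp only [List.foldl]
        rw [if_pos (by norm_num), ihx]
        simp [List.length_cons]; ring
    simp only [List.foldl, hrow]
    have h01 : (0 : Int) + 1 = 1 := by norm_num
    rw [h01]
    rw [pv_count_aux t 1 _ (by omega)]
    simp
    omega

-- B's fold splits into the row-max fold and the column-sums fold (independent components)
theorem pv_split (m : List (List Int)) (n : ℕ) (p : Int × String) (cs : List Int) :
    m.foldl (fun (st : (Int × String) × List Int) row =>
      ((if row.foldl (fun s e => s + e) 0 > st.1.1 then (row.foldl (fun s e => s + e) 0, "row") else st.1),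
       (List.range n).map (fun j => st.2.getD j 0 + row.getD j 0))) (p, cs)
    = (m.foldl (fun (st : Int × String) row =>
        if row.foldl (fun s e => s + e) 0 > st.1 then (row.foldl (fun s e => s + e) 0, "row") else st) p,
       m.foldl (fun (cs : List Int) row =>
        (List.range n).map (fun j => cs.getD j 0 + row.getD j 0)) cs) := by
  induction m generalizing p cs with
  | nil => rfl
  | cons r t ih => simp only [List.foldl]; rw [ih]

theorem pv_shift (m : List (List Int)) (j : ℕ) (a : Int) :
    m.foldl (fun s row => s + row.getD j 0) a = a + m.foldl (fun s row => s + row.getD j 0) 0 := by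
  induction m generalizing a with
  | nil => simp
  | cons r t ih => simp only [List.foldl]; rw [ih, ih (0 + _)]; ring

-- the column-sums fold computes the per-column sums
theorem pv_cols (m : List (List Int)) (n : ℕ) (cs : List Int) (hcs : cs.length = n) :
    m.foldl (fun (cs : List Int) row =>
      (List.range n).map (fun j => cs.getD j 0 + row.getD j 0)) cs
    = (List.range n).map (fun j => cs.getD j 0 + m.foldl (fun s row => s + row.getD j 0) 0) := by
  induction m generalizing cs with
  | nil =>
    simp only [List.foldl_nil]
    apply List.ext_getElem
    · simp [hcs]
    · intro i h1 h2
      simp only [List.getElem_map, List.getElem_range, add_zero]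
      rw [List.getD_eq_getElem cs 0 (by omega)]
  | cons r t ih =>
    simp only [List.foldl]
    rw [ih _ (by simp)]
    apply List.map_congr_left
    intro j hj
    rw [List.mem_range] at hj
    have : (List.map (fun j => cs.getD j 0 + r.getD j 0) (List.range n)).getD j 0
        = cs.getD j 0 + r.getD j 0 := by
      rw [List.getD_eq_getElem _ 0 (by simpa using hj)]; simp
    rw [this, pv_shift t j (0 + r.getD j 0)]
    ring

theorem pv_repl (n y : ℕ) : (List.replicate n (0 : Int)).getD y 0 = 0 := by
  simp [List.getD, List.getElem?_replicate]
  split <;> rfl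

-- A's indexed column sum equals a direct fold over the rows
theorem pv_idx (m : List (List Int)) (j : ℕ) (a : Int) :
    (List.range m.length).foldl (fun s i => s + (m.getD i []).getD j 0) a
    = m.foldl (fun s row => s + row.getD j 0) a := by
  induction m generalizing a with
  | nil => simp
  | cons r t ih =>
    rw [List.length_cons, List.range_succ_eq_map]
    simp only [List.foldl_cons, List.foldl_map, List.getD_cons_zero, List.getD_cons_succ]
    exact ih _

-- ===== VERDICT (by name: the statement is the Claim_ definition above) =====
theorem get_row_col_maxsum_spec : Claim_equal_get_row_col_maxsum := by
  intro matrix _ _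
  unfold Spec_get_row_col_maxsum
  simp only [get_row_col_maxsum, get_row_col_maxsum_alt]
  rw [pv_count, pv_split, pv_cols _ _ _ (by simp)]
  simp only [PySem.List.pyRange_zero_natCast, List.foldl_map, PySem.List.pyGetD_natCast]
  simp only [pv_idx, pv_repl, zero_add]
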